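-- pv_equiv track=rewrite | github.com/Musadalancikar/Codeforces-Python | 1538A-StoneGame.py | stone_game1
-- ===== SOURCE A (Python) =====
-- def stone_game1(n, lst):
--     lst_copy = lst.copy()
--     min_lst = min(lst_copy)
--     max_lst = max(lst_copy)
--     total = 0
--     for j in range(n):
--         if min_lst in lst_copy or max_lst in lst_copy:
--             lst_copy.remove(lst_copy[0])
--             total += 1
--         else:
--             break
--     return total
-- ===== SOURCE B (Python) =====
-- def stone_game1(n, lst):
--     lo = min(lst)
--     hi = max(lst)
--     last = 0
--     for i, v in enumerate(lst):
--         if v == lo or v == hi: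
--             last = i + 1
--     return max(0, min(n, last))
-- ===== Notes on version B (the rewrite author's own statement) =====
-- stated objective: faster
-- what changed: Replaces the loop of repeated O(n) membership tests and front removals by a single pass that records the last position holding the min or max; answer is that position+1, clamped to [0,n].
import Mathlib
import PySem

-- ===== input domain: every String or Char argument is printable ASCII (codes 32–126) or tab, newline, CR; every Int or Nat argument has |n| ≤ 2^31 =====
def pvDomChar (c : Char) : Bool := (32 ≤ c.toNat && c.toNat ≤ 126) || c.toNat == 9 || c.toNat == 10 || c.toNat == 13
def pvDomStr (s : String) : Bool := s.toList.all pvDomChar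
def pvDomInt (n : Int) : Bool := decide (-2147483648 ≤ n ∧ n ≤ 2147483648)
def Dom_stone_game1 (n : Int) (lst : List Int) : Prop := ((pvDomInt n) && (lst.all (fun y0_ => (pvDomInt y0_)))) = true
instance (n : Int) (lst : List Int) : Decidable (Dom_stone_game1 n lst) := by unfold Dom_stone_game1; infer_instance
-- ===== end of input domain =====

-- B: one pass recording the last position holding the min or the max (O(n) vs A's repeated membership scans).
-- ===== PORT A =====
-- the 'for j in range(n)' loop of A: membership test, drop the front (remove(lst_copy[0]) = tail), count
def stoneGameLoopA (mn mx : Int) : Nat → List Int → Int → Int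
  | 0, _, total => total
  | k + 1, copy, total =>
    if mn ∈ copy ∨ mx ∈ copy then stoneGameLoopA mn mx k copy.tail (total + 1)
    else total

def stone_game1 (n : Int) (lst : List Int) : Int :=
  let mn := ((PySem.List.min? lst (fun x => x)).getD 0)   -- Pre_ excludes lst = [], where min/max raise
  let mx := ((PySem.List.max? lst (fun x => x)).getD 0)
  stoneGameLoopA mn mx n.toNat lst 0

-- ===== PORT B =====
def stone_game1_alt (n : Int) (lst : List Int) : Int :=
  let lo := ((PySem.List.min? lst (fun x => x)).getD 0)
  let hi := ((PySem.List.max? lst (fun x => x)).getD 0)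
  let last := (PySem.List.enumerate lst 0).foldl
    (fun acc p => if p.2 = lo ∨ p.2 = hi then p.1 + 1 else acc) 0
  max 0 (min n last)

-- ===== PRECONDITION & SPEC =====
-- Pre_ excludes the empty list, on which Python's min() raises ValueError.
def Pre_stone_game1 (n : Int) (lst : List Int) : Prop := lst ≠ []
instance (n : Int) (lst : List Int) : Decidable (Pre_stone_game1 n lst) := by unfold Pre_stone_game1; infer_instance
def pvWitness_stone_game1 : Int × List Int := (3, [2, 1, 3])

def Spec_stone_game1 (n : Int) (lst : List Int) (out : Int) : Prop := out = stone_game1_alt n lst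
instance (n : Int) (lst : List Int) (out : Int) : Decidable (Spec_stone_game1 n lst out) := by unfold Spec_stone_game1; infer_instance

-- ===== CLAIM (what is proved, stated in full; the proofs are below) =====
def Claim_equal_stone_game1 : Prop := ∀ (n : Int) (lst : List Int), Dom_stone_game1 n lst → Pre_stone_game1 n lst → Spec_stone_game1 n lst (stone_game1 n lst)

-- ===== LEMMAS AND PROOFS =====

-- number of front removals A performs when given unlimited iterations:
-- 1 + (last position holding mn or mx), 0 if neither occurs
def gCnt (mn mx : Int) : List Int → Nat
  | [] => 0
  | x :: xs => if mn ∈ x :: xs ∨ mx ∈ x :: xs then 1 + gCnt mn mx xs else 0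

theorem gCnt_eq_zero_iff (mn mx : Int) (xs : List Int) :
    gCnt mn mx xs = 0 ↔ ¬(mn ∈ xs ∨ mx ∈ xs) := by
  cases xs with
  | nil => simp [gCnt]
  | cons x xs =>
    simp only [gCnt]
    split_ifs with h
    · exact iff_of_false (by omega) (not_not_intro h)
    · exact iff_of_true rfl h

theorem loopA_eq (mn mx : Int) : ∀ (k : Nat) (copy : List Int) (total : Int),
    stoneGameLoopA mn mx k copy total = total + ((min k (gCnt mn mx copy) : Nat) : Int) := by
  intro k
  induction k with
  | zero => intro copy total; simp [stoneGameLoopA]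
  | succ k ih =>
    intro copy total
    cases copy with
    | nil => simp [stoneGameLoopA, gCnt]
    | cons x xs =>
      simp only [stoneGameLoopA]
      split_ifs with h
      · rw [ih]
        simp only [List.tail_cons, gCnt, if_pos h]
        push_cast
        omega
      · simp only [gCnt, if_neg h]
        simp

theorem foldB_eq (mn mx : Int) : ∀ (xs : List Int) (i : Int) (acc : Int),
    (PySem.List.enumerate xs i).foldl
      (fun acc p => if p.2 = mn ∨ p.2 = mx then p.1 + 1 else acc) acc
      = if gCnt mn mx xs = 0 then acc else i + (gCnt mn mx xs : Int) := by
  intro xs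
  induction xs with
  | nil => intro i acc; simp [PySem.List.enumerate_nil, gCnt]
  | cons x xs ih =>
    intro i acc
    rw [PySem.List.enumerate_cons, List.foldl_cons, ih]
    by_cases hx : x = mn ∨ x = mx
    · have hmem : mn ∈ x :: xs ∨ mx ∈ x :: xs := by
        rcases hx with h | h <;> [left; right] <;> simp [h.symm]
      simp only [gCnt, if_pos hmem, if_pos hx]
      split_ifs with h0 <;> push_cast <;> omega
    · have hiff : (mn ∈ x :: xs ∨ mx ∈ x :: xs) ↔ (mn ∈ xs ∨ mx ∈ xs) := by
        constructor
        · rintro (h | h) <;> rcases List.mem_cons.mp h with h' | h'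
          · exact absurd (Or.inl h'.symm) hx
          · exact Or.inl h'
          · exact absurd (Or.inr h'.symm) hx
          · exact Or.inr h'
        · rintro (h | h)
          · exact Or.inl (List.mem_cons_of_mem _ h)
          · exact Or.inr (List.mem_cons_of_mem _ h)
      by_cases h0 : gCnt mn mx xs = 0
      · have hnm : ¬(mn ∈ x :: xs ∨ mx ∈ x :: xs) := by
          rw [hiff]; exact (gCnt_eq_zero_iff mn mx xs).mp h0
        have hg : gCnt mn mx (x :: xs) = 0 := by rw [gCnt, if_neg hnm]
        rw [if_pos h0, if_neg hx, hg, if_pos rfl]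
      · have hm : mn ∈ x :: xs ∨ mx ∈ x :: xs := by
          rw [hiff]
          by_contra hc
          exact h0 ((gCnt_eq_zero_iff mn mx xs).mpr hc)
        have hg : gCnt mn mx (x :: xs) = 1 + gCnt mn mx xs := by
          rw [gCnt, if_pos hm]
        rw [if_neg h0, hg]
        rw [if_neg (by omega : ¬(1 + gCnt mn mx xs = 0))]
        push_cast; omega

-- ===== VERDICT (by name: the statement is the Claim_ definition above) =====
theorem stone_game1_spec : Claim_equal_stone_game1 := by
  intro n lst _ _
  unfold Spec_stone_game1
  simp only [stone_game1, stone_game1_alt]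
  rw [loopA_eq, foldB_eq]
  split_ifs with h0
  · simp [h0]
  · push_cast; omega
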